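-- pv_equiv track=rewrite | github.com/TrueAndyT/voice_ass | services/tts_streaming_client.py | _find_break_point
-- ===== SOURCE A (Python) =====
-- def _find_break_point(text: str) -> int:
--     """Find the best point to break text for TTS streaming."""
--     # Look for sentence endings first
--     for i in range(len(text) - 1, -1, -1):
--         if text[i] in '.!?':
--             return i + 1
--
--     # Look for comma or other punctuation
--     for i in range(len(text) - 1, -1, -1):
--         if text[i] in ',:;':
--             return i + 1
--
--     # Look for word boundaries
--     for i in range(len(text) - 1, -1, -1):
--         if text[i] == ' ':
--             return i + 1
--
--     # If no good break point found, return full length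
--     return len(text)
-- ===== SOURCE B (Python) =====
-- def _find_break_point(text: str) -> int:
--     """Find the best point to break text for TTS streaming."""
--     last_sentence = last_comma = last_space = -1
--     for i, ch in enumerate(text):
--         if ch in '.!?':
--             last_sentence = i
--         if ch in ',:;':
--             last_comma = i
--         if ch == ' ':
--             last_space = i
--     if last_sentence >= 0:
--         return last_sentence + 1
--     if last_comma >= 0:
--         return last_comma + 1
--     if last_space >= 0:
--         return last_space + 1
--     return len(text)
-- ===== Notes on version B (the rewrite author's own statement) =====
-- stated objective: alternative
-- what changed: Replaces A's three sequential reverse scans (each re-traversing the string from the end) with a single forward pass that tracks the last seen index of each punctuation class, followed by one priority decision.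
import Mathlib
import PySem

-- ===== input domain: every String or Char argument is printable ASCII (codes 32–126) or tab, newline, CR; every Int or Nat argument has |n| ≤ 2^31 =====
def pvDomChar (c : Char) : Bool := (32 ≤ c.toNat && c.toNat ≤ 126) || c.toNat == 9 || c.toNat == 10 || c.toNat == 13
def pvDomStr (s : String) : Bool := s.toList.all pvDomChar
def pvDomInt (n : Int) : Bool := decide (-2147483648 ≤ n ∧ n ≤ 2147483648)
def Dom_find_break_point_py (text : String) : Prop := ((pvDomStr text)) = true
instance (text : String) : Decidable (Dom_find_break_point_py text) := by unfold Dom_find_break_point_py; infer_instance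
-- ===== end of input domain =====

-- B replaces A's three sequential reverse scans with one forward pass tracking the
-- last index of each punctuation class plus a final priority decision (alternative
-- decomposition, same exact result).

-- ===== PORT A =====
-- one reverse loop 'for i in range(n-1,-1,-1): if text[i] in S: return i+1';
-- A contains this loop three times with different character sets S.
-- fuel = i+1, i.e. current index is fuel-1; index is always in range, so getD is exact.
def pvScanDown (cs : List Char) (S : List Char) : Nat → Option Int
  | 0 => none
  | Nat.succ i => if S.contains (cs.getD i ' ') then some ((i : Int) + 1) else pvScanDown cs S i

def find_break_point_py (text : String) : Int :=
  match pvScanDown text.toList ['.', '!', '?'] text.toList.length with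
  | some r => r
  | none =>
    match pvScanDown text.toList [',', ':', ';'] text.toList.length with
    | some r => r
    | none =>
      match pvScanDown text.toList [' '] text.toList.length with
      | some r => r
      | none => (text.toList.length : Int)

-- ===== PORT B =====
-- loop body of Source B: three independent 'if' updates of (last_sentence, last_comma, last_space)
def pvStep (s : Int × Int × Int) (p : Int × Char) : Int × Int × Int :=
  (if ['.', '!', '?'].contains p.2 then p.1 else s.1,
   if [',', ':', ';'].contains p.2 then p.1 else s.2.1,
   if [' '].contains p.2 then p.1 else s.2.2)

-- final priority decision of Source B
def pvFinish (st : Int × Int × Int) (n : Nat) : Int :=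
  if st.1 ≥ 0 then st.1 + 1
  else if st.2.1 ≥ 0 then st.2.1 + 1
  else if st.2.2 ≥ 0 then st.2.2 + 1
  else (n : Int)

def find_break_point_py_alt (text : String) : Int :=
  pvFinish ((PySem.List.enumerate text.toList).foldl pvStep (-1, -1, -1)) text.toList.length

-- ===== PRECONDITION & SPEC =====
def Spec_find_break_point_py (text : String) (out : Int) : Prop := out = find_break_point_py_alt text
instance (text : String) (out : Int) : Decidable (Spec_find_break_point_py text out) := by unfold Spec_find_break_point_py; infer_instance

-- ===== CLAIM (what is proved, stated in full; the proofs are below) =====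
def Claim_equal_find_break_point_py : Prop := ∀ (text : String), Dom_find_break_point_py text → Spec_find_break_point_py text (find_break_point_py text)

-- ===== LEMMAS AND PROOFS =====

-- last index (as Int, -1 if none) of a character of S in cs
def pvLast (S cs : List Char) : Int :=
  (PySem.List.enumerate cs).foldl (fun a p => if S.contains p.2 then p.1 else a) (-1)

theorem pvStep_split_gen (l : List (Int × Char)) (a b c : Int) :
    l.foldl pvStep (a, b, c) =
      (l.foldl (fun a p => if ['.', '!', '?'].contains p.2 then p.1 else a) a,
       l.foldl (fun a p => if [',', ':', ';'].contains p.2 then p.1 else a) b,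
       l.foldl (fun a p => if [' '].contains p.2 then p.1 else a) c) := by
  induction l generalizing a b c with
  | nil => rfl
  | cons x xs ih => simpa [pvStep] using ih _ _ _

theorem pvStep_split (cs : List Char) :
    (PySem.List.enumerate cs).foldl pvStep (-1, -1, -1) =
      (pvLast ['.', '!', '?'] cs, pvLast [',', ':', ';'] cs, pvLast [' '] cs) := by
  rw [pvStep_split_gen]; rfl

theorem pvLast_take_succ (S cs : List Char) (m : Nat) (hm : m < cs.length) :
    pvLast S (cs.take (m + 1)) =
      if S.contains cs[m] then (m : Int) else pvLast S (cs.take m) := by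
  have htake : cs.take (m + 1) = cs.take m ++ [cs[m]] := by
    rw [List.take_add_one, List.getElem?_eq_getElem hm]; rfl
  have hlen : (cs.take m).length = m := List.length_take_of_le (Nat.le_of_lt hm)
  rw [pvLast, htake, PySem.List.enumerate_append, List.foldl_append, hlen]
  simp [pvLast, PySem.List.enumerate]

theorem pvScanDown_eq (cs S : List Char) :
    ∀ n, n ≤ cs.length →
      pvScanDown cs S n =
        (if pvLast S (cs.take n) < 0 then none else some (pvLast S (cs.take n) + 1)) := by
  intro n
  induction n with
  | zero => intro _; simp [pvScanDown, pvLast]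
  | succ m ih =>
    intro hn
    have hm : m < cs.length := Nat.lt_of_succ_le hn
    have hget : cs.getD m ' ' = cs[m] := List.getD_eq_getElem cs ' ' hm
    have hstep : pvScanDown cs S (m + 1) =
        if S.contains (cs.getD m ' ') then some ((m : Int) + 1) else pvScanDown cs S m := rfl
    rw [hstep, hget, pvLast_take_succ S cs m hm]
    by_cases h : S.contains cs[m] = true
    · have hmem : cs[m] ∈ S := by simpa using h
      have hge : ¬ ((m : Int) < 0) := by omega
      simp [hmem, hge]
    · have h' : S.contains cs[m] = false := by simpa using h
      rw [h']
      simp only [Bool.false_eq_true, if_false]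
      exact ih (Nat.le_of_lt hm)

theorem pvMain (text : String) :
    find_break_point_py text = find_break_point_py_alt text := by
  unfold find_break_point_py find_break_point_py_alt
  rw [pvStep_split]
  rw [pvScanDown_eq _ _ _ (le_refl _), pvScanDown_eq _ _ _ (le_refl _),
      pvScanDown_eq _ _ _ (le_refl _), List.take_length]
  unfold pvFinish
  by_cases h1 : pvLast ['.', '!', '?'] text.toList < 0 <;>
    by_cases h2 : pvLast [',', ':', ';'] text.toList < 0 <;>
      by_cases h3 : pvLast [' '] text.toList < 0 <;>
        simp [h1, h2, h3] <;> omega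

-- ===== VERDICT (by name: the statement is the Claim_ definition above) =====
theorem find_break_point_py_spec : Claim_equal_find_break_point_py := by
  intro text _
  unfold Spec_find_break_point_py
  exact pvMain text
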